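-- pv_equiv track=rewrite | github.com/Sopraz/Work | Exercices Dossier 2 Sorbonne.py | nb_couple_divise
-- ===== SOURCE A (Python) =====
-- def nb_couple_divise(i,j):
--     nb_couples = 0
--     x = i
--     g = x+1
--     cpt = 0
--     while cpt < j-i:
--         while g <=j:
--             if g%x ==0:
--                 nb_couples +=1
--             g = g+1
--         x = x+1
--         g = x+1
--         cpt+= 1
--     return nb_couples
-- ===== SOURCE B (Python) =====
-- def nb_couple_divise(i, j):
--     total = 0
--     for x in range(i, j):
--         d = abs(x)
--         total += j // d - x // d
--     return total
-- ===== Notes on version B (the rewrite author's own statement) =====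
-- stated objective: alternative
-- what changed: Replaces the nested scan over pairs (x,g) by a single pass over x that counts multiples of x in (x, j] with one floor-division formula j//|x| - x//|x|.
import Mathlib
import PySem

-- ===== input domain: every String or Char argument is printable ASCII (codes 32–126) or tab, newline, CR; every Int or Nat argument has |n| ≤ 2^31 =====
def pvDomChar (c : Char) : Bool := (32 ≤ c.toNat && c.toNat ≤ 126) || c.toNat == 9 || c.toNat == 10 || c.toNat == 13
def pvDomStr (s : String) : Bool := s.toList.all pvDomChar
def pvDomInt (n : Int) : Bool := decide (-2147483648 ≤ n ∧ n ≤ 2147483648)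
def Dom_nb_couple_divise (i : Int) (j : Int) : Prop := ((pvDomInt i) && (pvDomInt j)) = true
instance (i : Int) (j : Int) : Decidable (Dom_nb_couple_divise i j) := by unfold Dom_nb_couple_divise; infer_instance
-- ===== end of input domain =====

-- B replaces A's nested pair scan by one pass over x summing j//|x| - x//|x| (a different, single-pass algorithm).

-- ===== PORT A =====
-- inner 'while g <= j' loop of A
def pvInnerA (x j : Int) (g : Int) (nb : Int) : Int :=
  if _h : g ≤ j then
    pvInnerA x j (g + 1) (if PySem.Int.mod g x = 0 then nb + 1 else nb)
  else nb
termination_by (j + 1 - g).toNat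
decreasing_by omega

-- outer 'while cpt < j-i' loop of A
def pvOuterA (i j : Int) (x g nb cpt : Int) : Int :=
  if _h : cpt < j - i then
    pvOuterA i j (x + 1) (x + 2) (pvInnerA x j g nb) (cpt + 1)
  else nb
termination_by (j - i - cpt).toNat
decreasing_by omega

def nb_couple_divise (i : Int) (j : Int) : Int :=
  pvOuterA i j i (i + 1) 0 0

-- ===== PORT B =====
def nb_couple_divise_alt (i : Int) (j : Int) : Int :=
  (PySem.List.pyRange i j 1).foldl
    (fun total x =>
      let d := |x|
      total + (PySem.Int.floordiv j d - PySem.Int.floordiv x d)) 0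

-- ===== PRECONDITION & SPEC =====
-- Pre_ excludes exactly the inputs where the Python A raises ZeroDivisionError (x = 0 is reached, i.e. i ≤ 0 < j)
def Pre_nb_couple_divise (i : Int) (j : Int) : Prop := 0 < i ∨ j ≤ 0
instance (i : Int) (j : Int) : Decidable (Pre_nb_couple_divise i j) := by unfold Pre_nb_couple_divise; infer_instance
def pvWitness_nb_couple_divise : Int × Int := (2, 10)

def Spec_nb_couple_divise (i : Int) (j : Int) (out : Int) : Prop := out = nb_couple_divise_alt i j
instance (i : Int) (j : Int) (out : Int) : Decidable (Spec_nb_couple_divise i j out) := by unfold Spec_nb_couple_divise; infer_instance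

-- ===== CLAIM (what is proved, stated in full; the proofs are below) =====
def Claim_equal_nb_couple_divise : Prop := ∀ (i : Int) (j : Int), Dom_nb_couple_divise i j → Pre_nb_couple_divise i j → Spec_nb_couple_divise i j (nb_couple_divise i j)

-- ===== LEMMAS AND PROOFS =====

-- floor-division step: for 0 < d, (g-1)/d = g/d - 1 exactly when d divides g
theorem pv_ediv_sub_one (g d : Int) (hd : 0 < d) :
    (g - 1) / d = if d ∣ g then g / d - 1 else g / d := by
  by_cases h : d ∣ g
  · obtain ⟨k, rfl⟩ := h
    have h1 : d * k - 1 = (d - 1) + d * (k - 1) := by ring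
    rw [if_pos ⟨k, rfl⟩, h1, Int.add_mul_ediv_left _ _ (ne_of_gt hd),
        Int.ediv_eq_zero_of_lt (by omega) (by omega),
        Int.mul_ediv_cancel_left _ (ne_of_gt hd)]
    ring
  · have hr0 : g % d ≠ 0 := fun hc => h (Int.dvd_of_emod_eq_zero hc)
    have hrlo : 0 ≤ g % d := Int.emod_nonneg g (ne_of_gt hd)
    have hrhi : g % d < d := Int.emod_lt_of_pos g hd
    have hg : g = d * (g / d) + g % d := (Int.mul_ediv_add_emod g d).symm
    have h1 : g - 1 = (g % d - 1) + d * (g / d) := by omega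
    rw [if_neg h, h1, Int.add_mul_ediv_left _ _ (ne_of_gt hd),
        Int.ediv_eq_zero_of_lt (by omega) (by omega)]
    ring

-- A's inner loop in closed form: it counts the multiples of x in [g, j]
theorem pvInnerA_eq (x j : Int) (hx : x ≠ 0) :
    ∀ (n : Nat) (g nb : Int), (j + 1 - g).toNat = n → g - 1 ≤ j →
    pvInnerA x j g nb =
      nb + (PySem.Int.floordiv j |x| - PySem.Int.floordiv (g - 1) |x|) := by
  have hd : (0:Int) < |x| := abs_pos.mpr hx
  intro n
  induction n with
  | zero =>
    intro g nb hn hg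
    have hgj : g - 1 = j := by omega
    rw [pvInnerA, dif_neg (by omega), hgj]
    ring
  | succ n ih =>
    intro g nb hn hg
    have hgle : g ≤ j := by omega
    rw [pvInnerA, dif_pos hgle, ih (g + 1) _ (by omega) (by omega)]
    have hdvd : PySem.Int.mod g x = 0 ↔ x ∣ g := PySem.Int.mod_eq_zero_iff_dvd g x
    have habs : |x| ∣ g ↔ x ∣ g := abs_dvd x g
    have hf1 : PySem.Int.floordiv (g - 1) |x| = (g - 1) / |x| :=
      PySem.Int.floordiv_eq_ediv_of_pos hd
    have hf2 : PySem.Int.floordiv (g + 1 - 1) |x| = g / |x| := by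
      rw [PySem.Int.floordiv_eq_ediv_of_pos hd]; norm_num
    have hstep := pv_ediv_sub_one g |x| hd
    by_cases h : x ∣ g
    · rw [if_pos (hdvd.mpr h), hf1, hf2, hstep, if_pos (habs.mpr h)]; ring
    · rw [if_neg (fun hc => h (hdvd.mp hc)), hf1, hf2, hstep,
          if_neg (fun hc => h (habs.mp hc))]

-- A's outer loop = the sum B computes over the remaining range
theorem pvOuterA_eq (i j : Int) (hpre : 0 < i ∨ j ≤ 0) :
    ∀ (n : Nat) (cpt x nb : Int), 0 ≤ cpt → x = i + cpt → (j - i - cpt).toNat = n →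
    pvOuterA i j x (x + 1) nb cpt =
      nb + ((PySem.List.pyRange x j 1).map
        (fun y => PySem.Int.floordiv j |y| - PySem.Int.floordiv y |y|)).sum := by
  intro n
  induction n with
  | zero =>
    intro cpt x nb hc hx hn
    rw [pvOuterA, dif_neg (by omega), PySem.List.pyRange_one_eq_nil (by omega)]
    simp
  | succ n ih =>
    intro cpt x nb hc hx hn
    have hlt : cpt < j - i := by omega
    have hxj : x < j := by omega
    have hx0 : x ≠ 0 := by omega
    rw [pvOuterA, dif_pos hlt]
    have h2 : x + 2 = (x + 1) + 1 := by ring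
    rw [h2, ih (cpt + 1) (x + 1) _ (by omega) (by omega) (by omega)]
    rw [pvInnerA_eq x j hx0 (j + 1 - (x + 1)).toNat (x + 1) nb rfl (by omega)]
    rw [PySem.List.pyRange_one_cons hxj]
    simp only [List.map_cons, List.sum_cons]
    have hxx : x + 1 - 1 = x := by ring
    rw [hxx]
    ring

-- ===== VERDICT (by name: the statement is the Claim_ definition above) =====
theorem nb_couple_divise_spec : Claim_equal_nb_couple_divise := by
  intro i j _hdom hpre
  unfold Spec_nb_couple_divise nb_couple_divise
  show pvOuterA i j i (i + 1) 0 0 =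
    (PySem.List.pyRange i j 1).foldl
      (fun total x => total + (PySem.Int.floordiv j |x| - PySem.Int.floordiv x |x|)) 0
  rw [PySem.List.foldl_add, pvOuterA_eq i j hpre (j - i).toNat 0 i 0 le_rfl (by omega) (by omega)]
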